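-- pv_equiv track=rewrite | github.com/417ps/granalytich-solutions-website | logo_extractor.py | find_boundaries
-- ===== SOURCE A (Python) =====
-- def find_boundaries(projection, min_gap=20):
--     """
--     Find boundaries in projection where gaps occur
--     """
--     boundaries = [0]
--     in_gap = projection[0] < min_gap
--
--     for i in range(1, len(projection)):
--         current_low = projection[i] < min_gap
--
--         if in_gap and not current_low:  # End of gap
--             boundaries.append(i)
--         elif not in_gap and current_low:  # Start of gap
--             # Don't add boundary immediately, wait for gap to end
--             pass
--
--         in_gap = current_low
--
--     boundaries.append(len(projection))
--     return boundaries
-- ===== SOURCE B (Python) =====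
-- def find_boundaries(projection, min_gap=20):
--     """
--     Run-length view: a boundary is the start index of every not-low run
--     that is immediately preceded by a low run, plus 0 and len(projection).
--     """
--     runs = []  # [is_low, length] for maximal runs of equal (value < min_gap)
--     for v in projection:
--         low = v < min_gap
--         if runs and runs[-1][0] == low:
--             runs[-1][1] += 1
--         else:
--             runs.append([low, 1])
--     boundaries = [0]
--     start = 0
--     prev_low = False
--     for low, n in runs:
--         if prev_low and not low:
--             boundaries.append(start)
--         prev_low = low
--         start += n
--     boundaries.append(start)
--     return boundaries
-- ===== Notes on version B (the rewrite author's own statement) =====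
-- stated objective: alternative
-- what changed: Replaces A's index loop with prev/current flag over range(1, len) by a two-phase run-length decomposition: first group the projection into maximal runs of equal (value < min_gap), then scan the runs emitting the start index of each not-low run preceded by a low run.
import Mathlib
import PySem

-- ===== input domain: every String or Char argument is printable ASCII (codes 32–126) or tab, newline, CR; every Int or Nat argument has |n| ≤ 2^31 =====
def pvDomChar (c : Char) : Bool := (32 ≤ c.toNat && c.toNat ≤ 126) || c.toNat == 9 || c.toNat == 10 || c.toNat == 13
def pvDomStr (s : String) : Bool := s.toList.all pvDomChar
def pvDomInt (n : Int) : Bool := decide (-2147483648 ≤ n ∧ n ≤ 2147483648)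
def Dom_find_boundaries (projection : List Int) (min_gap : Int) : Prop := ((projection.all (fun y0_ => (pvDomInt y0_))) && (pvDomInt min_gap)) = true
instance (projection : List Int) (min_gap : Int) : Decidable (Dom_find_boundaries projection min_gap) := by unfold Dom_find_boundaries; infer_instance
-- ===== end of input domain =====

-- B replaces A's flag-carrying index loop by a run-length decomposition (group into
-- maximal low/not-low runs, then scan the runs); same cost, different decomposition.
-- A raises IndexError on an empty projection (excluded by Pre_); B returns a degenerate boundary list there.

-- ===== PORT A =====
-- literal port of A: boundaries starts with a single zero; in_gap tests the first element;
-- for i in range(1, len): append i when in_gap and not current_low; finally append len.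
def find_boundaries (projection : List Int) (min_gap : Int) : List Int :=
  let in_gap0 : Bool := decide (PySem.List.pyGetD projection 0 0 < min_gap)
  let st :=
    (PySem.List.pyRange 1 (projection.length : Int) 1).foldl
      (fun (st : List Int × Bool) i =>
        let current_low : Bool := decide (PySem.List.pyGetD projection i 0 < min_gap)
        let bs := if st.2 && !current_low then st.1 ++ [i] else st.1  -- elif branch is a no-op (pass)
        (bs, current_low))
      ([0], in_gap0)
  st.1 ++ [(projection.length : Int)]

-- ===== PORT B =====
-- runs are built front-to-back in Python by mutating runs[-1]; here the list is kept
-- reversed so that updating the last run is a head update, then reversed once.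
-- loop body of the run-building pass (runs kept reversed)
def rleStep (min_gap : Int) (acc : List (Bool × Int)) (v : Int) : List (Bool × Int) :=
  let low : Bool := decide (v < min_gap)
  match acc with
  | (l, n) :: rest => if l = low then (l, n + 1) :: rest else (low, 1) :: (l, n) :: rest
  | [] => [(low, 1)]

def rleRev (projection : List Int) (min_gap : Int) : List (Bool × Int) :=
  projection.foldl (rleStep min_gap) []

def find_boundaries_alt (projection : List Int) (min_gap : Int) : List Int :=
  let runs := (rleRev projection min_gap).reverse
  let st :=
    runs.foldl
      (fun (st : List Int × Int × Bool) r =>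
        let bs := if st.2.2 && !r.1 then st.1 ++ [st.2.1] else st.1
        (bs, st.2.1 + r.2, r.1))
      ([0], 0, false)
  st.1 ++ [st.2.1]

-- ===== PRECONDITION & SPEC =====
-- Pre_ excludes only the empty projection, on which A raises IndexError at its initial subscript.
def Pre_find_boundaries (projection : List Int) (min_gap : Int) : Prop := projection ≠ []
instance (projection : List Int) (min_gap : Int) : Decidable (Pre_find_boundaries projection min_gap) := by unfold Pre_find_boundaries; infer_instance
def pvWitness_find_boundaries : List Int × Int := ([5, 30, 2, 25], 20)

def Spec_find_boundaries (projection : List Int) (min_gap : Int) (out : List Int) : Prop := out = find_boundaries_alt projection min_gap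
instance (projection : List Int) (min_gap : Int) (out : List Int) : Decidable (Spec_find_boundaries projection min_gap out) := by unfold Spec_find_boundaries; infer_instance

-- ===== CLAIM (what is proved, stated in full; the proofs are below) =====
def Claim_equal_find_boundaries : Prop := ∀ (projection : List Int) (min_gap : Int), Dom_find_boundaries projection min_gap → Pre_find_boundaries projection min_gap → Spec_find_boundaries projection min_gap (find_boundaries projection min_gap)

-- ===== LEMMAS AND PROOFS =====

-- the boundary indices both programs emit, abstracted over the low/not-low sequence
def emit (i : Int) (prev : Bool) : List Bool → List Int
  | [] => []
  | l :: ls => (if prev && !l then [i] else []) ++ emit (i + 1) l ls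

def lows (projection : List Int) (min_gap : Int) : List Bool :=
  projection.map (fun v => decide (v < min_gap))

def expand (r : Bool × Int) : List Bool := List.replicate r.2.toNat r.1

theorem aLoop_emit (projection : List Int) (min_gap : Int) :
    ∀ (rest : List Int) (k : Nat), projection.drop k = rest →
    ∀ (bs : List Int) (prev : Bool),
    ((PySem.List.pyRange (k : Int) (projection.length : Int) 1).foldl
      (fun (st : List Int × Bool) i =>
        (if st.2 && !decide (PySem.List.pyGetD projection i 0 < min_gap) then st.1 ++ [i] else st.1,
         decide (PySem.List.pyGetD projection i 0 < min_gap)))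
      (bs, prev)).1 = bs ++ emit (k : Int) prev (lows rest min_gap) := by
  intro rest
  induction rest with
  | nil =>
    intro k hk bs prev
    have hlen : projection.length ≤ k := by
      by_contra h
      have := List.drop_eq_nil_iff.mp hk
      omega
    rw [PySem.List.pyRange_one_eq_nil (by exact_mod_cast hlen)]
    simp [emit, lows]
  | cons v vs ih =>
    intro k hk bs prev
    have hklt : k < projection.length := by
      by_contra h
      have : projection.drop k = [] := List.drop_eq_nil_iff.mpr (by omega)
      rw [this] at hk; simp at hk
    have hget : projection.getD k 0 = v := by
      have h0 : projection[k]? = some v := by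
        have := congrArg (fun t => t[0]?) hk
        simpa using this
      simp [List.getD_eq_getElem?_getD, h0]
    have hdrop : projection.drop (k + 1) = vs := by
      have : (projection.drop k).tail = vs := by rw [hk]; rfl
      simpa [List.tail_drop] using this
    rw [PySem.List.pyRange_one_cons (by exact_mod_cast hklt)]
    simp only [List.foldl_cons]
    have hcast : ((k : Int) + 1) = ((k + 1 : Nat) : Int) := by push_cast; ring
    rw [hcast, ih (k + 1) hdrop]
    simp only [lows, List.map_cons, emit, PySem.List.pyGetD_natCast, hget]
    by_cases hc : (prev && !decide (v < min_gap)) = true <;> simp [hc, List.append_assoc]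

theorem emit_replicate (l : Bool) :
    ∀ (m : Nat) (start : Int) (rest : List Bool),
    emit start l (List.replicate m l ++ rest) = emit (start + m) l rest := by
  intro m
  induction m with
  | zero => intro start rest; simp
  | succ m ih =>
    intro start rest
    simp only [List.replicate_succ, List.cons_append, emit]
    rw [ih (start + 1)]
    simp
    ring_nf

theorem bScan_emit (min_gap : Int) :
    ∀ (runs : List (Bool × Int)), (∀ r ∈ runs, 1 ≤ r.2) →
    ∀ (bs : List Int) (start : Int) (prev : Bool),
    (runs.foldl
      (fun (st : List Int × Int × Bool) r =>
        let bs := if st.2.2 && !r.1 then st.1 ++ [st.2.1] else st.1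
        (bs, st.2.1 + r.2, r.1))
      (bs, start, prev)) =
      (bs ++ emit start prev (runs.flatMap expand),
       start + ((runs.flatMap expand).length : Int),
       (runs.flatMap expand).getLastD prev) := by
  intro runs
  induction runs with
  | nil => intro _ bs start prev; simp [emit]
  | cons r rs ih =>
    intro h bs start prev
    obtain ⟨l, n⟩ := r
    have hn : 1 ≤ n := h (l, n) (by simp)
    obtain ⟨m, hm⟩ : ∃ m : Nat, n.toNat = m + 1 := ⟨n.toNat - 1, by omega⟩
    simp only [List.foldl_cons]
    rw [ih (fun r hr => h r (by simp [hr]))]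
    have hexp : expand (l, n) = List.replicate (m + 1) l := by simp [expand, hm]
    have hflat : (((l, n) :: rs).flatMap expand) = List.replicate (m + 1) l ++ rs.flatMap expand := by
      simp [List.flatMap_cons, hexp]
    rw [hflat]
    have hcastn : ((n.toNat : Nat) : Int) = n := by omega
    refine Prod.ext ?_ (Prod.ext ?_ ?_)
    · -- boundaries component
      simp only
      conv_rhs => rw [show List.replicate (m + 1) l ++ rs.flatMap expand = l :: (List.replicate m l ++ rs.flatMap expand) by simp [List.replicate_succ]]
      simp only [emit]
      rw [emit_replicate l m (start + 1)]
      have : start + 1 + (m : Int) = start + n := by omega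
      rw [this]
      by_cases hc : (prev && !l) = true <;> simp [hc, List.append_assoc]
    · -- start component
      simp only [List.length_append, List.length_replicate]
      push_cast
      omega
    · -- prev component
      simp only
      rw [show List.replicate (m + 1) l ++ rs.flatMap expand = (List.replicate m l ++ [l]) ++ rs.flatMap expand by simp [List.replicate_succ']]
      rcases hsplit : rs.flatMap expand with _ | ⟨x, xs⟩
      · simp
      · have hs : ((x :: xs).getLast?).isSome := by simp
        obtain ⟨y, hy⟩ := Option.isSome_iff_exists.mp hs
        simp [hy]

theorem rleStep_nil (min_gap v : Int) :
    rleStep min_gap [] v = [(decide (v < min_gap), 1)] := rfl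

theorem rleStep_cons (min_gap v : Int) (l : Bool) (n : Int) (rest : List (Bool × Int)) :
    rleStep min_gap ((l, n) :: rest) v =
      if l = decide (v < min_gap) then (l, n + 1) :: rest
      else (decide (v < min_gap), 1) :: (l, n) :: rest := rfl

theorem rleRev_spec (min_gap : Int) :
    ∀ (xs : List Int) (acc : List (Bool × Int)), (∀ r ∈ acc, 1 ≤ r.2) →
    ((xs.foldl (rleStep min_gap) acc).reverse.flatMap expand
      = acc.reverse.flatMap expand ++ lows xs min_gap)
    ∧ (∀ r ∈ xs.foldl (rleStep min_gap) acc, 1 ≤ r.2) := by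
  intro xs
  induction xs with
  | nil => intro acc h; exact ⟨by simp [lows], h⟩
  | cons v vs ih =>
    intro acc h
    simp only [List.foldl_cons]
    have key : (rleStep min_gap acc v).reverse.flatMap expand
                 = acc.reverse.flatMap expand ++ [decide (v < min_gap)]
               ∧ (∀ r ∈ rleStep min_gap acc v, 1 ≤ r.2) := by
      rcases acc with _ | ⟨⟨l, n⟩, rest⟩
      · refine ⟨by simp [rleStep_nil, expand], ?_⟩
        intro r hr; rw [rleStep_nil] at hr; simp at hr; simp [hr]
      · have hn : 1 ≤ n := h (l, n) (by simp)
        rw [rleStep_cons]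
        by_cases hl : l = decide (v < min_gap)
        · refine ⟨?_, ?_⟩
          · rw [if_pos hl, ← hl]
            simp only [List.reverse_cons, List.flatMap_append]
            have hexp1 : expand (l, n + 1) = expand (l, n) ++ [l] := by
              simp only [expand]
              rw [show (n + 1).toNat = n.toNat + 1 by omega, List.replicate_succ']
            simp [hexp1]
          · intro r hr
            rw [if_pos hl] at hr
            rcases List.mem_cons.mp hr with hr | hr
            · simp [hr]; omega
            · exact h r (by simp [hr])
        · refine ⟨?_, ?_⟩
          · simp only [if_neg hl, List.reverse_cons, List.flatMap_append]
            simp [expand]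
          · intro r hr
            simp only [if_neg hl] at hr
            rcases List.mem_cons.mp hr with hr | hr
            · simp [hr]
            · exact h r hr
    obtain ⟨keq, kge⟩ := key
    obtain ⟨ieq, ige⟩ := ih _ kge
    refine ⟨?_, ige⟩
    rw [ieq, keq]
    simp [lows]

-- A's result for a nonempty projection, via aLoop_emit
theorem portA_closed (p0 : Int) (tl : List Int) (min_gap : Int) :
    find_boundaries (p0 :: tl) min_gap
      = [0] ++ emit 1 (decide (p0 < min_gap)) (lows tl min_gap) ++ [(((p0 :: tl).length : Nat) : Int)] := by
  unfold find_boundaries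
  simp only []
  have h := aLoop_emit (p0 :: tl) min_gap tl 1 rfl [0] (decide (PySem.List.pyGetD (p0 :: tl) 0 0 < min_gap))
  have hget0 : PySem.List.pyGetD (p0 :: tl) 0 0 = p0 := by
    simpa using PySem.List.pyGetD_zero_cons (x := p0) (xs := tl) (d := (0 : Int))
  simp only [Nat.cast_one] at h
  rw [h]
  simp

-- B's result, via rleRev_spec and bScan_emit
theorem portB_closed (projection : List Int) (min_gap : Int) :
    find_boundaries_alt projection min_gap
      = [0] ++ emit 0 false (lows projection min_gap) ++ [((projection.length : Nat) : Int)] := by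
  unfold find_boundaries_alt rleRev
  simp only []
  obtain ⟨heq, hge⟩ := rleRev_spec min_gap projection [] (fun r hr => by simp at hr)
  have hge' : ∀ r ∈ (projection.foldl (rleStep min_gap) []).reverse, 1 ≤ r.2 := by
    intro r hr; exact hge r (List.mem_reverse.mp hr)
  rw [bScan_emit min_gap _ hge' [0] 0 false]
  simp only [heq]
  have hlen : ((lows projection min_gap).length : Int) = (projection.length : Int) := by
    simp [lows]
  simp [hlen]

-- ===== VERDICT (by name: the statement is the Claim_ definition above) =====
theorem find_boundaries_spec : Claim_equal_find_boundaries := by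
  intro projection min_gap _ hpre
  unfold Spec_find_boundaries
  match projection with
  | [] => exact absurd rfl hpre
  | p0 :: tl =>
    rw [portA_closed, portB_closed]
    simp only [lows, List.map_cons, emit]
    simp
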